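-- pv_equiv track=rewrite | github.com/daniel-reich/ubiquitous-fiesta | 8qD23E6XRMaWhyJ5z_21.py | happiness_number
-- ===== SOURCE A (Python) =====
-- def happiness_number(s):
--   mapping = {
--     ":)": 1,
--     "(:": 1,
--     ":(": -1,
--     "):": -1
--   }
--   return sum(s.count(face) * score for face, score in mapping.items())
-- ===== SOURCE B (Python) =====
-- def happiness_number(s):
--   scores = {(':', ')'): 1, ('(', ':'): 1, (':', '('): -1, (')', ':'): -1}
--   total = 0
--   for pair in zip(s, s[1:]):
--     total += scores.get(pair, 0)
--   return total
-- ===== Notes on version B (the rewrite author's own statement) =====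
-- stated objective: alternative
-- what changed: Replaces four separate str.count scans of the string with a single left-to-right pass over adjacent character pairs, scoring each window via one dict lookup (safe because no 2-char face can overlap itself).
import Mathlib
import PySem

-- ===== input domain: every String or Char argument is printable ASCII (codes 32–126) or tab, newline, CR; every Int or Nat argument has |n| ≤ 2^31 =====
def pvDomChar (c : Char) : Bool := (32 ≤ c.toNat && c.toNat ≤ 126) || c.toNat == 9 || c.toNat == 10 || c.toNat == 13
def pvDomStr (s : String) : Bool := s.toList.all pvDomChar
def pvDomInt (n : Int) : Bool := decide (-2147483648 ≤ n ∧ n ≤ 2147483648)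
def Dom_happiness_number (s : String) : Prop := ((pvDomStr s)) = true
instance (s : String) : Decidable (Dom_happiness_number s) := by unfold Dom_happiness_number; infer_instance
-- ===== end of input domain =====

-- B replaces A's four str.count scans by one pass over adjacent character pairs with a dict lookup; alternative decomposition, same result.

-- ===== PORT A =====
def happiness_number (s : String) : Int :=
  let mapping : PySem.Dict String Int :=
    PySem.Dict.mk [(":)", 1), ("(:", 1), (":(", -1), ("):", -1)]
  (mapping.items.map (fun fs => (PySem.Str.count s fs.1 : Int) * fs.2)).sum

-- ===== PORT B =====
def pvScores : PySem.Dict (Char × Char) Int :=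
  PySem.Dict.mk [((':', ')'), 1), (('(', ':'), 1), ((':', '('), -1), ((')', ':'), -1)]

def happiness_number_alt (s : String) : Int :=
  (s.toList.zip (PySem.Str.slice s (some 1) none).toList).foldl
    (fun total pair => total + pvScores.getD pair 0) 0

-- ===== PRECONDITION & SPEC =====
def Spec_happiness_number (s : String) (out : Int) : Prop := out = happiness_number_alt s
instance (s : String) (out : Int) : Decidable (Spec_happiness_number s out) := by unfold Spec_happiness_number; infer_instance

-- ===== CLAIM (what is proved, stated in full; the proofs are below) =====
def Claim_equal_happiness_number : Prop := ∀ (s : String), Dom_happiness_number s → Spec_happiness_number s (happiness_number s)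

-- ===== LEMMAS AND PROOFS =====

-- number of positions i with cs[i] = a and cs[i+1] = b (for a ≠ b this IS Python's cs.count(a+b))
def pvCnt2 (a b : Char) : List Char → Int
  | x :: y :: t => (if x = a ∧ y = b then 1 else 0) + pvCnt2 a b (y :: t)
  | _ => 0

lemma pvCnt2_cons_of_ne {a b y : Char} (h : y ≠ a) (t : List Char) :
    pvCnt2 a b (y :: t) = pvCnt2 a b t := by
  cases t with
  | nil => rfl
  | cons z t' => simp [pvCnt2, h]

lemma pvCnt2_nonneg (a b : Char) (cs : List Char) : 0 ≤ pvCnt2 a b cs := by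
  induction cs with
  | nil => simp [pvCnt2]
  | cons x t ih =>
    cases t with
    | nil => simp [pvCnt2]
    | cons y t' =>
      rw [show pvCnt2 a b (x :: y :: t') = (if x = a ∧ y = b then 1 else 0) + pvCnt2 a b (y :: t') from rfl]
      split_ifs <;> omega

lemma pv_go_eq {a b : Char} (h : a ≠ b) :
    ∀ (fuel : Nat) (l : List Char) (acc : Nat), l.length ≤ fuel →
      PySem.Chars.count.go [a, b] fuel l acc = acc + (pvCnt2 a b l).toNat := by
  intro fuel
  induction fuel with
  | zero =>
    intro l acc hl
    have : l = [] := List.eq_nil_of_length_eq_zero (Nat.le_zero.mp hl)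
    subst this; simp [PySem.Chars.count.go, pvCnt2]
  | succ n ih =>
    intro l acc hl
    cases l with
    | nil => simp [PySem.Chars.count.go, pvCnt2]
    | cons x t =>
      cases t with
      | nil =>
        have hpre : List.isPrefixOf [a, b] [x] = false := by
          simp [List.isPrefixOf]
        simp [PySem.Chars.count.go, hpre, pvCnt2]
        exact ih [] acc (by simp)
      | cons y t' =>
        by_cases hp : x = a ∧ y = b
        · obtain ⟨rfl, rfl⟩ := hp
          have hpre : List.isPrefixOf [x, y] (x :: y :: t') = true := by
            simp [List.isPrefixOf]
          rw [PySem.Chars.count.go, if_pos hpre]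
          have ht' : t'.length ≤ n := by have := Nat.le_of_succ_le_succ hl; simp at this; omega
          rw [show List.drop (List.length [x, y]) (x :: y :: t') = t' from rfl]
          rw [ih t' (acc + 1) ht']
          have : pvCnt2 x y (x :: y :: t') = 1 + pvCnt2 x y t' := by
            rw [show pvCnt2 x y (x :: y :: t') = (if x = x ∧ y = y then 1 else 0) + pvCnt2 x y (y :: t') from rfl]
            rw [pvCnt2_cons_of_ne (Ne.symm h) t']
            simp
          rw [this]
          have hnn : 0 ≤ pvCnt2 x y t' := pvCnt2_nonneg x y t'
          omega
        · have hpre : List.isPrefixOf [a, b] (x :: y :: t') = false := by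
            simp only [List.isPrefixOf, Bool.and_true, Bool.and_eq_false_iff, beq_eq_false_iff_ne]
            rcases Decidable.not_and_iff_not_or_not.mp hp with hx | hy
            · exact Or.inl (fun e => hx e.symm)
            · exact Or.inr (fun e => hy e.symm)
          rw [PySem.Chars.count.go, if_neg (by simp [hpre])]
          have ht : (y :: t').length ≤ n := Nat.le_of_succ_le_succ hl
          rw [ih (y :: t') acc ht]
          have : pvCnt2 a b (x :: y :: t') = pvCnt2 a b (y :: t') := by
            simp [pvCnt2, hp]
          rw [this]

lemma pv_count_eq {a b : Char} (h : a ≠ b) (cs : List Char) :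
    (PySem.Chars.count cs [a, b] : Int) = pvCnt2 a b cs := by
  have hnn : 0 ≤ pvCnt2 a b cs := pvCnt2_nonneg a b cs
  rw [show PySem.Chars.count cs [a, b] = PySem.Chars.count.go [a, b] cs.length cs 0 from by
    simp [PySem.Chars.count]]
  rw [pv_go_eq h cs.length cs 0 (le_refl _)]
  omega

lemma pvScores_getD (x y : Char) : pvScores.getD (x, y) 0 =
    (if x = ':' ∧ y = ')' then 1 else 0) + (if x = '(' ∧ y = ':' then 1 else 0)
    - (if x = ':' ∧ y = '(' then 1 else 0) - (if x = ')' ∧ y = ':' then 1 else 0) := by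
  by_cases h1 : (x, y) = (':', ')')
  · obtain ⟨rfl, rfl⟩ := Prod.mk.injEq .. ▸ h1; decide
  by_cases h2 : (x, y) = ('(', ':')
  · obtain ⟨rfl, rfl⟩ := Prod.mk.injEq .. ▸ h2; decide
  by_cases h3 : (x, y) = (':', '(')
  · obtain ⟨rfl, rfl⟩ := Prod.mk.injEq .. ▸ h3; decide
  by_cases h4 : (x, y) = (')', ':')
  · obtain ⟨rfl, rfl⟩ := Prod.mk.injEq .. ▸ h4; decide
  have e1 := Ne.symm h1; have e2 := Ne.symm h2; have e3 := Ne.symm h3; have e4 := Ne.symm h4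
  rw [Prod.mk.injEq] at h1 h2 h3 h4
  simp [pvScores, PySem.Dict.getD, e1, e2, e3, e4, PySem.Dict.get?, h1, h2, h3, h4]

lemma pv_fold_windows : ∀ (cs : List Char) (acc : Int),
    (cs.zip (cs.drop 1)).foldl (fun total pair => total + pvScores.getD pair 0) acc =
      acc + pvCnt2 ':' ')' cs + pvCnt2 '(' ':' cs - pvCnt2 ':' '(' cs - pvCnt2 ')' ':' cs := by
  intro cs
  induction cs with
  | nil => intro acc; simp [pvCnt2]
  | cons x t ih =>
    intro acc
    cases t with
    | nil => simp [pvCnt2]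
    | cons y t' =>
      have hz : (x :: y :: t').zip ((x :: y :: t').drop 1) =
          (x, y) :: ((y :: t').zip ((y :: t').drop 1)) := by simp
      rw [hz, List.foldl_cons, ih (acc + pvScores.getD (x, y) 0)]
      rw [pvScores_getD x y]
      simp only [show ∀ a b : Char, pvCnt2 a b (x :: y :: t') =
          (if x = a ∧ y = b then 1 else 0) + pvCnt2 a b (y :: t') from fun a b => rfl]
      ring

lemma pv_alt_eq (s : String) :
    happiness_number_alt s =
      pvCnt2 ':' ')' s.toList + pvCnt2 '(' ':' s.toList
        - pvCnt2 ':' '(' s.toList - pvCnt2 ')' ':' s.toList := by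
  unfold happiness_number_alt
  have hsl : (PySem.Str.slice s (some 1) none).toList = s.toList.drop 1 := by
    rw [PySem.Str.toList_slice, PySem.Chars.slice_eq_listSlice,
        PySem.List.slice_from s.toList (by norm_num : (0:Int) ≤ 1)]
    norm_num
  rw [hsl, pv_fold_windows s.toList 0]
  ring

-- ===== VERDICT (by name: the statement is the Claim_ definition above) =====
theorem happiness_number_spec : Claim_equal_happiness_number := by
  intro s _
  unfold Spec_happiness_number happiness_number
  rw [pv_alt_eq s]
  simp only [List.map, List.sum_cons, List.sum_nil]
  rw [PySem.Str.count_eq, PySem.Str.count_eq, PySem.Str.count_eq, PySem.Str.count_eq]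
  rw [show (":)" : String).toList = [':', ')'] from rfl,
      show ("(:" : String).toList = ['(', ':'] from rfl,
      show (":(" : String).toList = [':', '('] from rfl,
      show ("):" : String).toList = [')', ':'] from rfl]
  rw [pv_count_eq (by decide), pv_count_eq (by decide), pv_count_eq (by decide), pv_count_eq (by decide)]
  ring
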